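-- pv_equiv track=rewrite | github.com/stephen-w-choo/aoc-2023 | day-12-python/solution2.py | verify_possible_arrangement
-- ===== SOURCE A (Python) =====
-- def verify_possible_arrangement(immutable_record: str, arrangement: list[str]) -> bool:
--     # Reverse the record, turn it into a stack - the top
--     # of the stack will represent the current group being evaluated
--     record = [int(char) for char in immutable_record.split(",")]
--
--     record.reverse()
--
--     contiguous: int = 0
--     current_index = 0
--
--     for index, pool in enumerate(arrangement):
--         current_index = index
--         if pool == "?": # if there are any remaining unknowns, consider it possible
--             return True
--         if pool == "#":
--             contiguous += 1
--         if pool == ".": # cut off the group and compare to the record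
--             if contiguous > 0:
--                 target_group_n = record.pop()
--                 if target_group_n != contiguous:
--                     return False
--                 contiguous = 0 # reset the counter
--         if not record:
--             break
--
--     # edge case 1 - we exhaust our record early - check remaining indices
--     for i in range(current_index + 1, len(arrangement)):
--         if arrangement[i] == "#":
--             return False
--
--     # edge case 2 - arrangement ends on a "#" value
--     if record:
--         target_group_n = record.pop()
--         if record:
--             return False
--         if target_group_n != contiguous:
--             return False
--
--     return True
-- ===== SOURCE B (Python) =====
-- def verify_possible_arrangement(immutable_record: str, arrangement: list[str]) -> bool:
--     record = [int(x) for x in immutable_record.split(",")]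
--     tokens = [t for t in arrangement if t in ("#", ".", "?")]
--     if "?" in tokens:
--         q = tokens.index("?")
--         closed, open_run = _runs(tokens[:q])
--         if len(closed) < len(record):
--             return closed == record[:len(closed)]
--         return closed == record and open_run == 0 and "#" not in tokens[q + 1:]
--     closed, trailing = _runs(tokens)
--     return (closed == record and trailing == 0) or closed + [trailing] == record
--
--
-- def _runs(tokens):
--     closed, cur = [], 0
--     for t in tokens:
--         if t == "#":
--             cur += 1
--         elif cur > 0:
--             closed.append(cur)
--             cur = 0
--     return closed, cur
-- ===== Notes on version B (the rewrite author's own statement) =====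
-- stated objective: simpler
-- what changed: Instead of simulating A's reversed-record stack with mid-loop pops, breaks and two post-loop edge cases, B filters the tokens, splits at the first '?', builds the list of closed '#'-run lengths in one pass and decides by plain list comparisons against the parsed record.
import Mathlib
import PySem

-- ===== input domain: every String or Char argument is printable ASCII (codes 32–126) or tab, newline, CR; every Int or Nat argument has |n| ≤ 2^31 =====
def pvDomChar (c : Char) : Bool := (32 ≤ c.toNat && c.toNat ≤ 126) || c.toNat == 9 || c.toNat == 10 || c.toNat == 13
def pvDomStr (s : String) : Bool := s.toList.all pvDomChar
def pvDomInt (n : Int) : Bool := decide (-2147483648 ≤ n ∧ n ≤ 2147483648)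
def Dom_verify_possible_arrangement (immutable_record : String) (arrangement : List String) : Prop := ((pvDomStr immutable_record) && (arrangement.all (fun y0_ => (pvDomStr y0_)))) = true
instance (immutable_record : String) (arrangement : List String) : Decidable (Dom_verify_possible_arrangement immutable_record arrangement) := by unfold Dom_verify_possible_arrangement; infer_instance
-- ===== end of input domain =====

-- B re-implements the check by building the list of closed '#'-run lengths once and comparing it
-- to the parsed record with list equality (objective: simpler decomposition, same cost).

-- record = [int(char) for char in immutable_record.split(",")]  (shared first line of A and B;
-- the .getD 0 is unreachable under Pre_, which demands every piece parse as an int)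
def pvParseRecord (s : String) : List Int :=
  ((PySem.Str.split? s ",").getD []).map (fun x => (PySem.Int.ofStr? x).getD 0)

-- ===== PORT A =====
-- the scan 'for i in range(current_index + 1, len(arrangement)): if arrangement[i] == "#": return False'
-- followed by the (skipped: record is empty after a break) edge case 2 and 'return True'
def paScan (toks : List String) : Bool := toks.all (fun t => !(t == "#"))

-- code after the loop on normal exit (edge case 1 scans an empty range then; 'record' here is the reversed stack)
def paFinish (record : List Int) (contiguous : Int) : Bool :=
  if record.isEmpty then true
  else
    match PySem.List.pop? record with
    | none => false -- unreachable: record is nonempty here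
    | some (target_group_n, record') =>
      if !record'.isEmpty then false
      else if target_group_n != contiguous then false
      else true

-- the main 'for index, pool in enumerate(arrangement)' loop; 'if not record: break' jumps to paScan
def paLoop : List String → List Int → Int → Bool
  | [], record, contiguous => paFinish record contiguous
  | pool :: rest, record, contiguous =>
    if pool == "?" then true
    else if pool == "#" then
      (if record.isEmpty then paScan rest else paLoop rest record (contiguous + 1))
    else if pool == "." then
      (if contiguous > 0 then
        match PySem.List.pop? record with
        | none => false -- Python would raise IndexError; unreachable: record is nonempty at every pop
        | some (target_group_n, record') =>
          if target_group_n != contiguous then false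
          else if record'.isEmpty then paScan rest else paLoop rest record' 0
      else if record.isEmpty then paScan rest else paLoop rest record contiguous)
    else
      (if record.isEmpty then paScan rest else paLoop rest record contiguous)

def verify_possible_arrangement (immutable_record : String) (arrangement : List String) : Bool :=
  let record := pvParseRecord immutable_record
  let record := record.reverse
  paLoop arrangement record 0

-- ===== PORT B =====
-- _runs: closed '#'-run lengths plus the length of the open trailing run
def bRuns : List String → List Int → Int → List Int × Int
  | [], closed, cur => (closed, cur)
  | t :: rest, closed, cur =>
    if t == "#" then bRuns rest closed (cur + 1)
    else if cur > 0 then bRuns rest (closed ++ [cur]) 0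
    else bRuns rest closed cur

def verify_possible_arrangement_alt (immutable_record : String) (arrangement : List String) : Bool :=
  let record := pvParseRecord immutable_record
  let tokens := arrangement.filter (fun t => t == "#" || t == "." || t == "?")
  match PySem.List.index? tokens "?" with
  | some q =>
    let co := bRuns (tokens.take q) [] 0
    if co.1.length < record.length then decide (co.1 = record.take co.1.length)
    else decide (co.1 = record) && decide (co.2 = 0) && !((tokens.drop (q + 1)).contains "#")
  | none =>
    let ct := bRuns tokens [] 0
    (decide (ct.1 = record) && decide (ct.2 = 0)) || decide (ct.1 ++ [ct.2] = record)

-- ===== PRECONDITION & SPEC =====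
-- Pre_ excludes exactly the inputs where 'int(char)' raises ValueError in A (a comma piece that
-- does not parse as a Python int).
def Pre_verify_possible_arrangement (immutable_record : String) (arrangement : List String) : Prop :=
  ∀ s ∈ (PySem.Str.split? immutable_record ",").getD [], (PySem.Int.ofStr? s).isSome = true
instance (immutable_record : String) (arrangement : List String) : Decidable (Pre_verify_possible_arrangement immutable_record arrangement) := by unfold Pre_verify_possible_arrangement; infer_instance

def pvWitness_verify_possible_arrangement : String × List String := ("1,2", ["#", ".", "#", "#"])

def Spec_verify_possible_arrangement (immutable_record : String) (arrangement : List String) (out : Bool) : Prop := out = verify_possible_arrangement_alt immutable_record arrangement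
instance (immutable_record : String) (arrangement : List String) (out : Bool) : Decidable (Spec_verify_possible_arrangement immutable_record arrangement out) := by unfold Spec_verify_possible_arrangement; infer_instance

-- ===== CLAIM (what is proved, stated in full; the proofs are below) =====
def Claim_equal_verify_possible_arrangement : Prop := ∀ (immutable_record : String) (arrangement : List String), Dom_verify_possible_arrangement immutable_record arrangement → Pre_verify_possible_arrangement immutable_record arrangement → Spec_verify_possible_arrangement immutable_record arrangement (verify_possible_arrangement immutable_record arrangement)

-- ===== LEMMAS AND PROOFS =====

-- B's decision procedure, generalized to a mid-loop state of A: remaining (reversed) record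
-- stack `rec`, current open-run length `cont`.
def bCore (toks : List String) (rec : List Int) (cont : Int) : Bool :=
  match PySem.List.index? toks "?" with
  | some q =>
    let co := bRuns (toks.take q) [] cont
    if co.1.length < rec.length then decide (co.1 = rec.reverse.take co.1.length)
    else decide (co.1 = rec.reverse) && decide (co.2 = 0) && !((toks.drop (q + 1)).contains "#")
  | none =>
    let ct := bRuns toks [] cont
    (decide (ct.1 = rec.reverse) && decide (ct.2 = 0)) || decide (ct.1 ++ [ct.2] = rec.reverse)

lemma splitOn_go_ne_nil (sep : List Char) (fuel : Nat) (l cur : List Char) (acc : List (List Char)) :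
    PySem.Chars.splitOn.go sep fuel l cur acc ≠ [] := by
  fun_induction PySem.Chars.splitOn.go <;> simp_all

lemma parseRecord_ne_nil (s : String) : pvParseRecord s ≠ [] := by
  simp [pvParseRecord, PySem.Str.split?, PySem.Chars.split?, PySem.Chars.splitOn]
  exact splitOn_go_ne_nil _ _ _ _ _

lemma runs_acc (toks : List String) : ∀ (acc : List Int) (cur : Int),
    bRuns toks acc cur = (acc ++ (bRuns toks [] cur).1, (bRuns toks [] cur).2) := by
  induction toks with
  | nil => intro acc cur; simp [bRuns]
  | cons t rest ih =>
    intro acc cur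
    simp only [bRuns]
    split_ifs with h hc
    · exact ih acc (cur + 1)
    · rw [ih (acc ++ [cur]) 0, ih ([] ++ [cur]) 0]; simp
    · exact ih acc cur

lemma runs_pos (toks : List String) : ∀ (cur : Int), 0 < cur →
    ¬((bRuns toks [] cur).1 = [] ∧ (bRuns toks [] cur).2 = 0) := by
  induction toks with
  | nil => intro cur hc; simp [bRuns]; omega
  | cons t rest ih =>
    intro cur hc
    simp only [bRuns]
    split_ifs with h
    · exact ih (cur + 1) (by omega)
    · rw [runs_acc]; simp

lemma runs_no_hash (toks : List String) :
    ((bRuns toks [] 0).1 = [] ∧ (bRuns toks [] 0).2 = 0) ↔ ∀ t ∈ toks, t ≠ "#" := by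
  induction toks with
  | nil => simp [bRuns]
  | cons t rest ih =>
    by_cases h : t = "#"
    · subst h
      simp only [bRuns, beq_self_eq_true, if_pos]
      constructor
      · intro hcontra; exact absurd hcontra (runs_pos rest 1 (by omega))
      · intro hall; exact absurd rfl (hall "#" (by simp))
    · have hb : (t == "#") = false := by simpa using h
      simp [bRuns, hb, ih, h]

lemma scan_filter (toks : List String) :
    paScan (toks.filter (fun t => t == "#" || t == "." || t == "?")) = paScan toks := by
  induction toks with
  | nil => rfl
  | cons t rest ih =>
    simp only [List.filter_cons]
    by_cases h : (t == "#" || t == "." || t == "?") = true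
    · rw [if_pos h]
      show (!(t == "#") && paScan (List.filter _ rest)) = (!(t == "#") && paScan rest)
      rw [ih]
    · rw [if_neg h]
      have h1 : (t == "#") = false := by revert h; cases t == "#" <;> simp
      show paScan (List.filter _ rest) = paScan (t :: rest)
      rw [ih]
      show paScan rest = (!(t == "#") && paScan rest)
      rw [h1]; simp

lemma runs_dot_pos (pre : List String) (cont : Int) (hc : 0 < cont) :
    bRuns ("." :: pre) [] cont = (cont :: (bRuns pre [] 0).1, (bRuns pre [] 0).2) := by
  show (if ("." : String) == "#" then _ else if cont > 0 then _ else _) = _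
  rw [if_neg (by decide), if_pos hc, runs_acc]
  simp

lemma core_cons (p : String) (hp : p ≠ "?") (rest : List String) (rec : List Int) (cont cont' : Int)
    (hstep : ∀ pre : List String, bRuns (p :: pre) [] cont = bRuns pre [] cont') :
    bCore (p :: rest) rec cont = bCore rest rec cont' := by
  unfold bCore
  rw [PySem.List.index?_cons_of_ne rest hp]
  cases h : PySem.List.index? rest "?" with
  | none => simp only [Option.map_none]; rw [hstep rest]
  | some q =>
    simp only [Option.map_some]
    rw [List.take_succ_cons, hstep (rest.take q)]
    have : (p :: rest).drop (q + 1 + 1) = rest.drop (q + 1) := rfl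
    rw [this]

lemma core_dot_pos_ne (rest : List String) (D : List Int) (L cont : Int) (hc : 0 < cont)
    (hL : L ≠ cont) : bCore ("." :: rest) (D ++ [L]) cont = false := by
  unfold bCore
  rw [PySem.List.index?_cons_of_ne rest (by decide)]
  cases h : PySem.List.index? rest "?" with
  | none =>
    simp only [Option.map_none, runs_dot_pos _ _ hc]
    simp [List.reverse_append, Ne.symm hL]
  | some q =>
    simp only [Option.map_some, List.take_succ_cons, runs_dot_pos _ _ hc]
    simp [List.reverse_append, Ne.symm hL]

lemma core_dot_pos_last (rest : List String) (cont : Int) (hc : 0 < cont) :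
    bCore ("." :: rest) ([] ++ [cont]) cont = paScan rest := by
  unfold bCore
  rw [PySem.List.index?_cons_of_ne rest (by decide)]
  cases h : PySem.List.index? rest "?" with
  | none =>
    simp only [Option.map_none, runs_dot_pos _ _ hc]
    rw [Bool.eq_iff_iff]
    simp [paScan, List.all_eq_true]
    rw [← runs_no_hash rest]
  | some q =>
    obtain ⟨pre, suf, rfl, hlen, hmem⟩ := (PySem.List.index?_eq_some_iff rest "?" q).mp h
    simp only [Option.map_some, List.take_succ_cons, List.drop_succ_cons, runs_dot_pos _ _ hc]
    rw [List.take_left' hlen]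
    have hdrop : (pre ++ "?" :: suf).drop (q + 1) = suf := by
      rw [List.append_cons, List.drop_left' (by simp [hlen])]
    rw [hdrop]
    rw [Bool.eq_iff_iff]
    simp [paScan, List.all_eq_true]
    rw [← runs_no_hash pre]
    have : "#" ∉ suf ↔ ∀ x ∈ suf, ¬x = "#" := by
      constructor
      · intro hn x hx hxe; exact hn (hxe ▸ hx)
      · intro hall hmem2; exact hall _ hmem2 rfl
    rw [this]

lemma core_dot_pos (rest : List String) (D : List Int) (cont : Int) (hc : 0 < cont) :
    bCore ("." :: rest) (D ++ [cont]) cont = bCore rest D 0 := by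
  unfold bCore
  rw [PySem.List.index?_cons_of_ne rest (by decide)]
  cases h : PySem.List.index? rest "?" with
  | none =>
    simp only [Option.map_none, runs_dot_pos _ _ hc]
    simp [List.reverse_append]
  | some q =>
    simp only [Option.map_some, List.take_succ_cons, List.drop_succ_cons, runs_dot_pos _ _ hc]
    simp [List.reverse_append]

lemma loop_eq_core (toks : List String) : ∀ (rec : List Int) (cont : Int),
    (∀ t ∈ toks, t = "#" ∨ t = "." ∨ t = "?") → rec ≠ [] →
    paLoop toks rec cont = bCore toks rec cont := by
  induction toks with
  | nil =>
    intro rec cont _ hrec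
    obtain ⟨D, L, rfl⟩ := (List.eq_nil_or_concat' rec).resolve_left hrec
    show paFinish (D ++ [L]) cont = _
    rw [Bool.eq_iff_iff]
    simp [paFinish, bCore, bRuns, PySem.List.pop?_last, PySem.List.index?]
    tauto
  | cons p rest ih =>
    intro rec cont hall hrec
    have hrest := fun t ht => hall t (List.mem_cons_of_mem _ ht)
    have hne : rec.isEmpty = false := by simp [hrec]
    rcases hall p (by simp) with rfl | rfl | rfl
    · -- pool = "#"
      simp only [paLoop]
      rw [if_neg (by decide), if_pos (by decide), hne]
      rw [core_cons "#" (by decide) rest rec cont (cont + 1) (fun pre => by simp [bRuns])]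
      exact (if_neg (by simp)).trans (ih rec (cont + 1) hrest hrec)
    · -- pool = "."
      by_cases hc : (0 : Int) < cont
      · obtain ⟨D, L, rfl⟩ := (List.eq_nil_or_concat' rec).resolve_left hrec
        simp only [paLoop]
        rw [if_neg (by decide), if_neg (by decide), if_pos (by decide), if_pos hc]
        simp only [PySem.List.pop?_last]
        by_cases hL : L = cont
        · subst hL
          rw [if_neg (by simp)]
          by_cases hD : D = []
          · subst hD
            rw [if_pos (by simp), core_dot_pos_last rest L hc]
          · rw [if_neg (by simp [hD]), core_dot_pos rest D L hc]
            exact ih D 0 hrest hD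
        · rw [if_pos (by simp [hL]), core_dot_pos_ne rest D L cont hc hL]
      · simp only [paLoop]
        rw [if_neg (by decide), if_neg (by decide), if_pos (by decide), if_neg hc, hne]
        rw [core_cons "." (by decide) rest rec cont cont (fun pre => by simp [bRuns, hc])]
        exact (if_neg (by simp)).trans (ih rec cont hrest hrec)
    · -- pool = "?"
      simp only [paLoop]
      rw [if_pos (by decide)]
      unfold bCore
      rw [PySem.List.index?_cons_self]
      simp [bRuns, List.length_pos_iff, hrec]

lemma loop_filter (toks : List String) : ∀ (rec : List Int) (cont : Int), rec ≠ [] →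
    paLoop toks rec cont = paLoop (toks.filter (fun t => t == "#" || t == "." || t == "?")) rec cont := by
  induction toks with
  | nil => intro rec cont _; rfl
  | cons p rest ih =>
    intro rec cont hrec
    have hne : rec.isEmpty = false := by simp [hrec]
    by_cases hp : (p == "#" || p == "." || p == "?") = true
    · simp only [List.filter_cons, hp, if_true]
      have hp' : p = "#" ∨ p = "." ∨ p = "?" := by
        have := hp; simp at this; tauto
      rcases hp' with rfl | rfl | rfl
      · simp only [paLoop, show (("#" == "?") : Bool) = false from rfl,
          show (("#" == "#") : Bool) = true from rfl, Bool.false_eq_true, if_false, if_true, hne]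
        exact ih rec (cont + 1) hrec
      · simp only [paLoop, show (("." == "?") : Bool) = false from rfl,
          show (("." == "#") : Bool) = false from rfl, show (("." == ".") : Bool) = true from rfl,
          Bool.false_eq_true, if_false, if_true]
        by_cases hc : (0 : Int) < cont
        · simp only [show (cont > 0) = (0 < cont) from rfl, hc, if_true]
          obtain ⟨D, L, rfl⟩ := (List.eq_nil_or_concat' rec).resolve_left hrec
          simp only [PySem.List.pop?_last]
          by_cases hL : L = cont
          · subst hL
            simp only [bne_self_eq_false, Bool.false_eq_true, if_false]
            by_cases hD : D = []
            · subst hD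
              simp only [List.isEmpty_nil, if_true]
              exact (scan_filter rest).symm
            · have hDne : D.isEmpty = false := by simp [hD]
              simp only [hDne, Bool.false_eq_true, if_false]
              exact ih D 0 hD
          · have hbne : (L != cont) = true := by simp [hL]
            simp only [hbne, if_true]
        · simp only [show (cont > 0) = (0 < cont) from rfl, hc, if_false, hne,
            Bool.false_eq_true]
          exact ih rec cont hrec
      · simp only [paLoop, show (("?" == "?") : Bool) = true from rfl, if_true]
    · have hpf : (p == "#" || p == "." || p == "?") = false := by
        revert hp; cases p == "#" || p == "." || p == "?" <;> simp
      simp only [List.filter_cons, hpf, Bool.false_eq_true, if_false]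
      simp only [Bool.or_eq_true, not_or] at hp
      obtain ⟨⟨h1, h2⟩, h3⟩ := hp
      simp only [paLoop]
      rw [if_neg (by simp_all), if_neg (by simp_all), if_neg (by simp_all), hne]
      simp only [Bool.false_eq_true, if_false]
      exact ih rec cont hrec

-- ===== VERDICT (by name: the statement is the Claim_ definition above) =====
theorem verify_possible_arrangement_spec : Claim_equal_verify_possible_arrangement := by
  intro immutable_record arrangement _dom _pre
  unfold Spec_verify_possible_arrangement
  show verify_possible_arrangement _ _ = _
  unfold verify_possible_arrangement verify_possible_arrangement_alt
  have hrev : (pvParseRecord immutable_record).reverse ≠ [] := by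
    simpa using parseRecord_ne_nil immutable_record
  rw [loop_filter arrangement _ 0 hrev,
    loop_eq_core _ _ 0 (fun t ht => by have := (List.mem_filter.mp ht).2; simp at this; tauto) hrev]
  unfold bCore
  simp only [List.reverse_reverse, List.length_reverse]
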